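-- pv_equiv track=rewrite | github.com/TadejMohorcic/advent-of-code | 2015/2015-23.py | starting_number
-- ===== SOURCE A (Python) =====
-- def starting_number(value, i, instruction_list):
--     instruction = instruction_list[i]
--
--     match instruction[0]:
--         case 'inc':
--             return starting_number(value + 1, i + 1, instruction_list)
--         case 'tpl':
--             return starting_number(3 * value, i + 1, instruction_list)
--         case _:
--             return value
-- ===== SOURCE B (Python) =====
-- def starting_number(value, i, instruction_list):
--     # Phase 1: collect the opcodes that will actually run.
--     # (The unguarded indexing raises IndexError at the end of the program,
--     # exactly like A's recursion.)
--     ops = []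
--     j = i
--     while instruction_list[j][0] in ('inc', 'tpl'):
--         ops.append(instruction_list[j][0])
--         j += 1
--     # Phase 2: fold the collected opcodes over the value.
--     for op in ops:
--         value = value + 1 if op == 'inc' else 3 * value
--     return value
-- ===== Notes on version B (the rewrite author's own statement) =====
-- stated objective: alternative
-- what changed: Replaced A's value-carrying recursion by a two-phase iteration: a while loop first collects the list of opcodes that will execute, then a second loop folds them over the value.
import Mathlib
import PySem

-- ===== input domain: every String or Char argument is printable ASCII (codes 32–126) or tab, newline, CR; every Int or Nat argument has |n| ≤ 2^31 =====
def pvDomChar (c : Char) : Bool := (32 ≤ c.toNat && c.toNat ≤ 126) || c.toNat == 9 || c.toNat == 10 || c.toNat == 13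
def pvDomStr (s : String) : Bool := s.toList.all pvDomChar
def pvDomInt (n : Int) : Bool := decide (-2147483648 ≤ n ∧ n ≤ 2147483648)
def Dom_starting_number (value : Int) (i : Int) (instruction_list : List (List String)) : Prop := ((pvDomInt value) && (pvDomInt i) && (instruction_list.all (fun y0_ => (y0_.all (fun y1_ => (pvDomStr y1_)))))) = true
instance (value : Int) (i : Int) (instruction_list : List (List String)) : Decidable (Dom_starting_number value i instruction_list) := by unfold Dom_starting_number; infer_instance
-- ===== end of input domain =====

-- B replaces A's value-carrying recursion by a two-phase iteration (collect the executed
-- opcodes, then fold them over the value); objective: alternative decomposition, same cost.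


-- ===== PORT A =====
-- A's recursion, carried by a fuel counter (2·len+1 bounds the recursion depth on every
-- input where Python A returns; on fuel exhaustion or a would-be IndexError — both outside
-- Pre_ — the port returns the current value).
def starting_number_go (fuel : Nat) (value : Int) (i : Int) (instruction_list : List (List String)) : Int :=
  match fuel with
  | 0 => value
  | fuel + 1 =>
    match PySem.List.pyGet? instruction_list i with
    | none => value                      -- instruction_list[i] raises IndexError: outside Pre_
    | some instruction =>
      match instruction.head? with
      | some "inc" => starting_number_go fuel (value + 1) (i + 1) instruction_list
      | some "tpl" => starting_number_go fuel (3 * value) (i + 1) instruction_list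
      | some _ => value                  -- case _: return value
      | none => value                    -- instruction[0] raises IndexError: outside Pre_

def starting_number (value : Int) (i : Int) (instruction_list : List (List String)) : Int :=
  starting_number_go (2 * instruction_list.length + 1) value i instruction_list

-- ===== PORT B =====
-- Phase 1: the while loop collecting the opcodes that will run.
def starting_number_ops (fuel : Nat) (j : Int) (instruction_list : List (List String)) : List String :=
  match fuel with
  | 0 => []
  | fuel + 1 =>
    match PySem.List.pyGet? instruction_list j with
    | some (op :: _) =>
      if op = "inc" ∨ op = "tpl" then op :: starting_number_ops fuel (j + 1) instruction_list
      else []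
    | _ => []                            -- raising reads lie outside Pre_

-- Phase 2: fold the opcodes over the value.
def starting_number_alt (value : Int) (i : Int) (instruction_list : List (List String)) : Int :=
  (starting_number_ops (2 * instruction_list.length + 1) i instruction_list).foldl
    (fun v op => if op = "inc" then v + 1 else 3 * v) value

-- ===== PRECONDITION & SPEC =====
-- instruction at position x exists, is nonempty, and its opcode is 'inc' or 'tpl'
def pvStepAt (instruction_list : List (List String)) (x : Int) : Bool :=
  match PySem.List.pyGet? instruction_list x with
  | some (op :: _) => op = "inc" || op = "tpl"
  | _ => false

-- instruction at position x exists, is nonempty, and its opcode is neither 'inc' nor 'tpl'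
def pvStopAt (instruction_list : List (List String)) (x : Int) : Bool :=
  match PySem.List.pyGet? instruction_list x with
  | some (op :: _) => !(op = "inc" || op = "tpl")
  | _ => false

-- Pre_: exactly the inputs on which Python A returns (no IndexError): after j indexable,
-- nonempty 'inc'/'tpl' instructions the run reaches a nonempty non-'inc'/'tpl' instruction.
-- (j ≤ 2·len bounds the search: with Python's negative indexing the run reads at most 2·len
-- positions before any index is out of range.)
def Pre_starting_number (value : Int) (i : Int) (instruction_list : List (List String)) : Prop :=
  ∃ j : Nat, j ≤ 2 * instruction_list.length ∧
    (∀ k : Nat, k < j → pvStepAt instruction_list (i + k) = true) ∧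
    pvStopAt instruction_list (i + j) = true
instance (value : Int) (i : Int) (instruction_list : List (List String)) : Decidable (Pre_starting_number value i instruction_list) := by unfold Pre_starting_number; infer_instance

def pvWitness_starting_number : Int × Int × List (List String) :=
  (2, 0, [["inc"], ["tpl"], ["jmp", "a"]])

def Spec_starting_number (value : Int) (i : Int) (instruction_list : List (List String)) (out : Int) : Prop := out = starting_number_alt value i instruction_list
instance (value : Int) (i : Int) (instruction_list : List (List String)) (out : Int) : Decidable (Spec_starting_number value i instruction_list out) := by unfold Spec_starting_number; infer_instance

-- ===== CLAIM (what is proved, stated in full; the proofs are below) =====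
def Claim_equal_starting_number : Prop := ∀ (value : Int) (i : Int) (instruction_list : List (List String)), Dom_starting_number value i instruction_list → Pre_starting_number value i instruction_list → Spec_starting_number value i instruction_list (starting_number value i instruction_list)

-- ===== LEMMAS AND PROOFS =====
-- At equal fuel the two phases of B compose to exactly A's recursion (for every input).
theorem starting_number_go_eq_fold (fuel : Nat) :
    ∀ (value i : Int) (instruction_list : List (List String)),
      starting_number_go fuel value i instruction_list =
        (starting_number_ops fuel i instruction_list).foldl
          (fun v op => if op = "inc" then v + 1 else 3 * v) value := by
  induction fuel with
  | zero => intro v i l; rfl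
  | succ f ih =>
    intro v i l
    simp only [starting_number_go, starting_number_ops]
    cases h : PySem.List.pyGet? l i with
    | none => rfl
    | some ins =>
      cases ins with
      | nil => rfl
      | cons op rest =>
        by_cases hinc : op = "inc"
        · subst hinc
          simp [ih, List.foldl]
        · by_cases htpl : op = "tpl"
          · subst htpl
            simp [hinc, ih, List.foldl]
          · simp [hinc, htpl]

-- ===== VERDICT (by name: the statement is the Claim_ definition above) =====
theorem starting_number_spec : Claim_equal_starting_number := by
  intro value i instruction_list _ _
  unfold Spec_starting_number starting_number starting_number_alt
  exact starting_number_go_eq_fold _ value i instruction_list
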